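-- pv_equiv track=rewrite | github.com/egarcia-claro/L1Codes | GitHub_L1Codes.py | compute_stabilizer_size
-- ===== SOURCE A (Python) =====
-- def compute_stabilizer_size(a, m):
--
--     from collections import Counter
--     from math import factorial
--
--     n = len(a);    I_a = set()
--     for i in range(n):
--         reflected_value = m - (a[i] + 1)
--         if reflected_value in a:
--             I_a.add(i)
--
--     multiplicities = Counter(a)  # Dictionary with value: count
--     product_factorial = 1
--     for count in multiplicities.values():
--         product_factorial *= factorial(count)
--
--     stabilizer_size = (2 ** len(I_a)) * product_factorial
--     return stabilizer_size
-- ===== SOURCE B (Python) =====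
-- def compute_stabilizer_size(a, m):
--     from math import factorial
--     from bisect import bisect_left
--
--     s = sorted(a)
--     n = len(s)
--     pairs = 0
--     product = 1
--     i = 0
--     while i < n:
--         j = i + 1
--         while j < n and s[j] == s[i]:
--             j += 1
--         run = j - i
--         product *= factorial(run)
--         t = m - (s[i] + 1)
--         k = bisect_left(s, t)
--         if k < n and s[k] == t:
--             pairs += run
--         i = j
--     return (2 ** pairs) * product
-- ===== Notes on version B (the rewrite author's own statement) =====
-- stated objective: faster
-- what changed: B sorts the list once and scans it as maximal runs of equal values, multiplying factorial(run length) per run and adding the run length to the pair count when the reflected value is found by binary search, replacing A's per-index linear membership scan and separate Counter pass.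
import Mathlib
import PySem

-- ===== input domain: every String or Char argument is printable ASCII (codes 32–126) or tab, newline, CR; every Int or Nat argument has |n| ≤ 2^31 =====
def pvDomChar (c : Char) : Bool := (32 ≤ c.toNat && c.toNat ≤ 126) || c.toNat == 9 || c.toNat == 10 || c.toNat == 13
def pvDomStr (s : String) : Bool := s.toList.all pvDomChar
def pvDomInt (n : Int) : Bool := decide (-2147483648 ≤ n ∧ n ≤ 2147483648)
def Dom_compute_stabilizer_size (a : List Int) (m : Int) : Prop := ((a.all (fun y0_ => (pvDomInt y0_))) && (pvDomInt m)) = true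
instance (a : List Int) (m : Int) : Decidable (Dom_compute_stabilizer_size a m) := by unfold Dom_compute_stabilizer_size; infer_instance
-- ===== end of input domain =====

-- B sorts the list once, scans it as maximal runs of equal values (factorial of each
-- run length, run length added to the pair count when the reflected value is found by
-- binary search), instead of A's per-index membership scan plus a Counter pass.


-- ===== PORT A =====
def compute_stabilizer_size (a : List Int) (m : Int) : Int :=
  let n : Int := PySem.List.len a
  let I_a : PySem.Set Int :=
    (PySem.List.pyRange 0 n).foldl
      (fun s i => if (m - (PySem.List.pyGetD a i 0 + 1)) ∈ a then PySem.Set.add s i else s)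
      PySem.Set.empty
  let multiplicities := PySem.Dict.counter a
  let product_factorial : Int :=
    multiplicities.values.foldl (fun p c => p * (Nat.factorial c.toNat : Int)) 1
  (2 : Int) ^ (PySem.Set.len I_a).toNat * product_factorial

-- ===== PORT B =====
-- the outer while-loop of Source B: each step consumes one maximal run of equal values
-- from the remaining suffix, carrying the (pairs, product) accumulator
def pvRunLoop (s : List Int) (m : Int) : List Int → Int × Int → Int × Int
  | [], acc => acc
  | x :: rest, acc =>
    let run : Nat := (rest.takeWhile (fun y => y == x)).length + 1
    let t : Int := m - (x + 1)
    let k : Nat := PySem.List.bisectLeft s t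
    pvRunLoop s m (rest.dropWhile (fun y => y == x))
      ((if k < s.length ∧ PySem.List.pyGetD s (k : Int) 0 = t then acc.1 + (run : Int) else acc.1),
       acc.2 * (Nat.factorial run : Int))
termination_by l => l.length
decreasing_by simpa using Nat.lt_succ_of_le (List.length_dropWhile_le _ _)

def compute_stabilizer_size_alt (a : List Int) (m : Int) : Int :=
  let s := PySem.List.sorted a (fun x => x)
  let r := pvRunLoop s m s (0, 1)
  (2 : Int) ^ r.1.toNat * r.2

-- ===== PRECONDITION & SPEC =====
def Spec_compute_stabilizer_size (a : List Int) (m : Int) (out : Int) : Prop := out = compute_stabilizer_size_alt a m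
instance (a : List Int) (m : Int) (out : Int) : Decidable (Spec_compute_stabilizer_size a m out) := by unfold Spec_compute_stabilizer_size; infer_instance

-- ===== CLAIM (what is proved, stated in full; the proofs are below) =====
def Claim_equal_compute_stabilizer_size : Prop := ∀ (a : List Int) (m : Int), Dom_compute_stabilizer_size a m → Spec_compute_stabilizer_size a m (compute_stabilizer_size a m)

-- ===== LEMMAS AND PROOFS =====

-- B's membership test "bisect_left hit" finds exactly the members of a sorted list
theorem bisect_hit (s : List Int) (hs : s.Pairwise (· ≤ ·)) (t : Int) :
    (PySem.List.bisectLeft s t < s.length ∧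
      PySem.List.pyGetD s ((PySem.List.bisectLeft s t : Nat) : Int) 0 = t) ↔ t ∈ s := by
  obtain ⟨hle, hlt, hge⟩ := PySem.List.bisectLeft_spec s t hs
  constructor
  · rintro ⟨hk, he⟩
    rw [PySem.List.pyGetD_natCast, List.getD_eq_getElem _ _ hk] at he
    exact he ▸ List.getElem_mem hk
  · intro ht
    obtain ⟨i, hi, hei⟩ := List.getElem_of_mem ht
    have hki : PySem.List.bisectLeft s t ≤ i := by
      by_contra h
      exact absurd hei (ne_of_lt (hlt i hi (by omega)))
    have hk : PySem.List.bisectLeft s t < s.length := lt_of_le_of_lt hki hi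
    have h1 : t ≤ s[PySem.List.bisectLeft s t] := hge _ hk le_rfl
    have h2 : s[PySem.List.bisectLeft s t] ≤ t := by
      rcases Nat.lt_or_ge (PySem.List.bisectLeft s t) i with h | h
      · exact hei ▸ List.pairwise_iff_getElem.mp hs _ i hk hi h
      · have : PySem.List.bisectLeft s t = i := le_antisymm hki h
        simp [this, hei]
    refine ⟨hk, ?_⟩
    rw [PySem.List.pyGetD_natCast, List.getD_eq_getElem _ _ hk]
    omega

-- adding pairwise-fresh elements to a Set appends them in order
theorem foldl_set_add_of_fresh (l : List Int) :
    ∀ (s0 : PySem.Set Int), l.Nodup → (∀ x ∈ l, x ∉ s0) →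
    l.foldl PySem.Set.add s0 = s0 ++ l := by
  induction l with
  | nil => intro s0 _ _; simp
  | cons x t ih =>
    intro s0 hnd hfresh
    simp only [List.foldl_cons]
    rw [PySem.Set.add_of_not_mem (hfresh x (by simp))]
    have hfresh' : ∀ y ∈ t, y ∉ s0 ++ [x] := by
      intro y hy
      simp only [List.mem_append, List.mem_singleton]
      rintro (h | rfl)
      · exact hfresh y (List.mem_cons_of_mem _ hy) h
      · exact (List.nodup_cons.mp hnd).1 hy
    rw [ih (s0 ++ [x]) (List.Nodup.of_cons hnd) hfresh']
    simp

-- folding Set.add over elements already present changes nothing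
theorem foldl_set_add_of_mem (l : List Int) :
    ∀ (s0 : PySem.Set Int), (∀ y ∈ l, y ∈ s0) → l.foldl PySem.Set.add s0 = s0 := by
  induction l with
  | nil => intro s0 _; rfl
  | cons y t ih =>
    intro s0 h
    simp only [List.foldl_cons]
    have : PySem.Set.add s0 y = s0 := by
      simp [PySem.Set.add, PySem.Set.contains, List.contains_eq_mem, h y (by simp)]
    rw [this]
    exact ih s0 (fun z hz => h z (by simp [hz]))

-- if x never reappears, a leading x in the accumulator is preserved by Set.add folds
theorem foldl_set_add_cons_of_not_mem (x : Int) (l : List Int) :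
    x ∉ l → ∀ (s0 : PySem.Set Int), l.foldl PySem.Set.add (x :: s0) = x :: l.foldl PySem.Set.add s0 := by
  induction l with
  | nil => intro _ s0; rfl
  | cons y t ih =>
    intro hx s0
    have hne : ¬ (y = x) := by
      intro h; exact hx (by simp [h])
    have key : PySem.Set.add (x :: s0) y = x :: PySem.Set.add s0 y := by
      by_cases hm : y ∈ s0 <;>
        simp [PySem.Set.add, PySem.Set.contains, List.contains_eq_mem, hm, hne]
    simp only [List.foldl_cons, key]
    exact ih (fun h => hx (List.mem_cons_of_mem _ h)) _

-- x does not survive dropWhile (== x) on a sorted list bounded below by x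
theorem not_mem_dropWhile_self (x : Int) :
    ∀ (l : List Int), l.Pairwise (· ≤ ·) → (∀ y ∈ l, x ≤ y) →
    x ∉ l.dropWhile (fun y => y == x) := by
  intro l
  induction l with
  | nil => intro _ _; simp
  | cons y t ih =>
    intro hp hall
    by_cases hy : (y == x) = true
    · rw [List.dropWhile_cons, if_pos hy]
      exact ih (List.pairwise_cons.mp hp).2 (fun z hz => hall z (by simp [hz]))
    · rw [List.dropWhile_cons, if_neg hy]
      have hyx : y ≠ x := by simpa using hy
      have hxy : x < y := lt_of_le_of_ne (hall y (by simp)) (Ne.symm hyx)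
      intro hmem
      rcases List.mem_cons.mp hmem with h | h
      · omega
      · exact absurd ((List.pairwise_cons.mp hp).1 x h) (by omega)

-- the invariant of B's run loop on a sorted suffix
theorem pvRunLoop_spec (s : List Int) (m : Int) :
    ∀ (s' : List Int), s'.Pairwise (· ≤ ·) → ∀ (pairs prod : Int),
    pvRunLoop s m s' (pairs, prod) =
      (pairs + (s'.countP (fun x =>
          decide (PySem.List.bisectLeft s (m - (x + 1)) < s.length ∧
            PySem.List.pyGetD s ((PySem.List.bisectLeft s (m - (x + 1)) : Nat) : Int) 0 = m - (x + 1))) : Int),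
       prod * ((PySem.Set.ofList s').map (fun k => (Nat.factorial (s'.count k) : Int))).prod) := by
  intro s'
  induction hn : s'.length using Nat.strong_induction_on generalizing s' with
  | _ n ih =>
    match s' with
    | [] => intro _ pairs prod; simp [pvRunLoop, PySem.Set.ofList_eq_foldl]
    | x :: rest =>
      intro hp pairs prod
      obtain ⟨hall, hprest⟩ := List.pairwise_cons.mp hp
      set tw := rest.takeWhile (fun y => y == x) with htw
      set dr := rest.dropWhile (fun y => y == x) with hdr
      have hsplit : tw ++ dr = rest := List.takeWhile_append_dropWhile
      have htwx : ∀ y ∈ tw, y = x := fun y hy => by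
        simpa using List.mem_takeWhile_imp hy
      have htwrep : tw = List.replicate tw.length x := List.eq_replicate_of_mem htwx
      have hdrsub : dr.Sublist rest := List.dropWhile_sublist _
      have hpdr : dr.Pairwise (· ≤ ·) := hprest.sublist hdrsub
      have hxdr : x ∉ dr := not_mem_dropWhile_self x rest hprest hall
      have hlen : dr.length < n := by
        have h1 : dr.length ≤ rest.length := hdr ▸ List.length_dropWhile_le (fun y => y == x) rest
        have h2 : rest.length + 1 = n := by simpa using hn
        omega
      -- unfold one step of the loop and apply the induction hypothesis
      rw [pvRunLoop]
      rw [ih dr.length hlen dr rfl hpdr]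
      -- the distinct values of the whole suffix: x first, then those of dr
      have hofList : PySem.Set.ofList (x :: rest) = x :: PySem.Set.ofList dr := by
        rw [PySem.Set.ofList_eq_foldl, ← hsplit]
        have h0 : PySem.Set.add [] x = [x] := rfl
        rw [List.foldl_cons, h0, List.foldl_append]
        rw [foldl_set_add_of_mem tw [x] (fun y hy => by simp [htwx y hy])]
        rw [foldl_set_add_cons_of_not_mem x dr hxdr []]
        rw [← PySem.Set.ofList_eq_foldl]
      -- counts over the whole suffix
      have hcx : (x :: rest).count x = tw.length + 1 := by
        rw [← hsplit, List.count_cons_self, List.count_append, htwrep,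
          List.count_replicate, List.count_eq_zero_of_not_mem hxdr]
        simp
      have hck : ∀ k ∈ dr, (x :: rest).count k = dr.count k := by
        intro k hk
        have hkx : k ≠ x := fun h => hxdr (h ▸ hk)
        rw [← hsplit]
        simp only [List.count_cons, List.count_append]
        rw [htwrep]
        simp [List.count_replicate, Ne.symm hkx]
      -- countP over the whole suffix
      simp only [Prod.mk.injEq]
      refine ⟨?_, ?_⟩
      · -- pairs component
        have hq : List.countP (fun y =>
              decide (PySem.List.bisectLeft s (m - (y + 1)) < s.length ∧
                PySem.List.pyGetD s ((PySem.List.bisectLeft s (m - (y + 1)) : Nat) : Int) 0 = m - (y + 1))) (x :: rest)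
            = (if PySem.List.bisectLeft s (m - (x + 1)) < s.length ∧
            PySem.List.pyGetD s ((PySem.List.bisectLeft s (m - (x + 1)) : Nat) : Int) 0 = m - (x + 1) then (rest.takeWhile (fun y => y == x)).length + 1 else 0)
              + List.countP (fun y =>
              decide (PySem.List.bisectLeft s (m - (y + 1)) < s.length ∧
                PySem.List.pyGetD s ((PySem.List.bisectLeft s (m - (y + 1)) : Nat) : Int) 0 = m - (y + 1))) dr := by
          conv_lhs => rw [← hsplit]
          rw [List.countP_cons, List.countP_append]
          have htwc : List.countP (fun y =>
              decide (PySem.List.bisectLeft s (m - (y + 1)) < s.length ∧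
                PySem.List.pyGetD s ((PySem.List.bisectLeft s (m - (y + 1)) : Nat) : Int) 0 = m - (y + 1))) tw = if PySem.List.bisectLeft s (m - (x + 1)) < s.length ∧
            PySem.List.pyGetD s ((PySem.List.bisectLeft s (m - (x + 1)) : Nat) : Int) 0 = m - (x + 1) then tw.length else 0 := by
            rw [htwrep, List.countP_replicate]
            simp
          rw [htwc, ← htw]
          simp only [decide_eq_true_eq]
          split_ifs with h1 <;> omega
        rw [hq]
        by_cases h : PySem.List.bisectLeft s (m - (x + 1)) < s.length ∧
            PySem.List.pyGetD s ((PySem.List.bisectLeft s (m - (x + 1)) : Nat) : Int) 0 = m - (x + 1)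
        · rw [if_pos h, if_pos h]
          push_cast
          ring
        · rw [if_neg h, if_neg h]
          push_cast
          ring
      · -- product component
        rw [hofList, List.map_cons, List.prod_cons, hcx]
        have : (PySem.Set.ofList dr).map (fun k => (Nat.factorial ((x :: rest).count k) : Int))
            = (PySem.Set.ofList dr).map (fun k => (Nat.factorial (dr.count k) : Int)) := by
          apply List.map_congr_left
          intro k hk
          rw [hck k ((PySem.Set.mem_ofList dr k).mp hk)]
        rw [this]
        ring

-- A's result in closed form
theorem A_char (a : List Int) (m : Int) :
    compute_stabilizer_size a m =
      (2 : Int) ^ (a.countP (fun x => decide ((m - (x + 1)) ∈ a))) *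
        ((PySem.Set.ofList a).map (fun k => (Nat.factorial (a.count k) : Int))).prod := by
  unfold compute_stabilizer_size
  simp only [PySem.List.len_eq]
  rw [PySem.List.foldl_ite_eq_foldl_filter
      (p := fun i => (m - (PySem.List.pyGetD a i 0 + 1)) ∈ a) PySem.Set.add]
  rw [foldl_set_add_of_fresh _ _
      (List.Nodup.filter _ (PySem.List.nodup_pyRange_one 0 _))
      (by intro x _ hx; simp [PySem.Set.empty] at hx)]
  have hIa : ((PySem.List.pyRange 0 (a.length : Int)).filter
      (fun i => decide ((m - (PySem.List.pyGetD a i 0 + 1)) ∈ a))).length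
      = a.countP (fun x => decide ((m - (x + 1)) ∈ a)) := by
    rw [← List.countP_eq_length_filter]
    have hmap : (PySem.List.pyRange 0 (a.length : Int)).map (fun j => PySem.List.pyGetD a j 0) = a := by
      have := PySem.List.map_pyGetD_pyRange_zero a 0
      simpa [PySem.List.len_eq] using this
    have hcm := List.countP_map (p := fun x => decide ((m - (x + 1)) ∈ a))
      (f := fun j => PySem.List.pyGetD a j 0) (l := PySem.List.pyRange 0 (a.length : Int))
    rw [hmap] at hcm
    simpa [Function.comp] using hcm.symm
  have hprod : (PySem.Dict.counter a).values.foldl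
      (fun p c => p * (Nat.factorial c.toNat : Int)) 1
      = ((PySem.Set.ofList a).map (fun k => (Nat.factorial (a.count k) : Int))).prod := by
    have hv : (PySem.Dict.counter a).values
        = (PySem.Dict.counter a).items.map (·.2) := rfl
    rw [hv, PySem.Dict.items_counter, List.map_map]
    rw [List.prod_eq_foldl, List.foldl_map, List.foldl_map]
    simp [Function.comp]
  rw [hprod]
  simp [PySem.Set.empty, PySem.Set.len, hIa]

theorem compute_stabilizer_size_eq (a : List Int) (m : Int) :
    compute_stabilizer_size a m = compute_stabilizer_size_alt a m := by
  set s := PySem.List.sorted a (fun x => x) with hsdef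
  have halt : compute_stabilizer_size_alt a m
      = (2 : Int) ^ (pvRunLoop s m s (0, 1)).1.toNat * (pvRunLoop s m s (0, 1)).2 := rfl
  rw [halt]
  have hperm : s.Perm a := PySem.List.sorted_perm a (fun x => x) false
  have hs : s.Pairwise (· ≤ ·) := PySem.List.sorted_pairwise a (fun x => x)
  rw [pvRunLoop_spec s m s hs 0 1]
  simp only [zero_add, one_mul]
  -- pairs: the bisect hit is membership in s, i.e. in a
  have hcp : s.countP (fun x =>
      decide (PySem.List.bisectLeft s (m - (x + 1)) < s.length ∧
        PySem.List.pyGetD s ((PySem.List.bisectLeft s (m - (x + 1)) : Nat) : Int) 0 = m - (x + 1)))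
      = a.countP (fun x => decide ((m - (x + 1)) ∈ a)) := by
    have h1 : ∀ x : Int, (decide (PySem.List.bisectLeft s (m - (x + 1)) < s.length ∧
        PySem.List.pyGetD s ((PySem.List.bisectLeft s (m - (x + 1)) : Nat) : Int) 0 = m - (x + 1)))
        = decide ((m - (x + 1)) ∈ a) := by
      intro x
      have := bisect_hit s hs (m - (x + 1))
      simp only [decide_eq_decide]
      rw [this]
      exact ⟨fun h => hperm.mem_iff.mp h, fun h => hperm.mem_iff.mpr h⟩
    rw [List.countP_congr (fun x _ => by rw [h1 x])]
    exact hperm.countP_eq _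
  -- product: distinct values and their counts agree between s and a
  have hpr : ((PySem.Set.ofList s).map (fun k => (Nat.factorial (s.count k) : Int))).prod
      = ((PySem.Set.ofList a).map (fun k => (Nat.factorial (a.count k) : Int))).prod := by
    have hpermset : (PySem.Set.ofList s).Perm (PySem.Set.ofList a) := by
      rw [List.perm_ext_iff_of_nodup (PySem.Set.nodup_ofList s) (PySem.Set.nodup_ofList a)]
      intro k
      simp [PySem.Set.mem_ofList, hperm.mem_iff]
    have hc : ∀ k, s.count k = a.count k := hperm.count_eq
    calc ((PySem.Set.ofList s).map (fun k => (Nat.factorial (s.count k) : Int))).prod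
        = ((PySem.Set.ofList s).map (fun k => (Nat.factorial (a.count k) : Int))).prod := by
          apply congrArg
          exact List.map_congr_left (fun k _ => by rw [hc k])
      _ = ((PySem.Set.ofList a).map (fun k => (Nat.factorial (a.count k) : Int))).prod :=
          (hpermset.map _).prod_eq
  rw [A_char a m, hcp, hpr]
  simp

-- ===== VERDICT (by name: the statement is the Claim_ definition above) =====
theorem compute_stabilizer_size_spec : Claim_equal_compute_stabilizer_size := by
  intro a m _
  unfold Spec_compute_stabilizer_size
  exact compute_stabilizer_size_eq a m
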